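-- pv_equiv track=rewrite | github.com/six6hroun/third-year | Интерпретируемые языки программирования/лаб1/z1.2.py | proiz_c_ch
-- ===== SOURCE A (Python) =====
-- def proiz_c_ch (a):
--     b = 1
--     while a > 0:
--         d = a % 10
--         if d % 5 != 0:
--             b *= d
--         a //= 10
--     return b
-- ===== SOURCE B (Python) =====
-- def proiz_c_ch(a):
--     b = 1
--     if a > 0:
--         for ch in str(a):
--             d = int(ch)
--             if d % 5 != 0:
--                 b *= d
--     return b
-- ===== Notes on version B (the rewrite author's own statement) =====
-- stated objective: idiomatic
-- what changed: Replaces the arithmetic digit-peeling while-loop (a%10, a//=10) with a single traversal of the decimal string str(a), multiplying in each digit not divisible by 5.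
import Mathlib
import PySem

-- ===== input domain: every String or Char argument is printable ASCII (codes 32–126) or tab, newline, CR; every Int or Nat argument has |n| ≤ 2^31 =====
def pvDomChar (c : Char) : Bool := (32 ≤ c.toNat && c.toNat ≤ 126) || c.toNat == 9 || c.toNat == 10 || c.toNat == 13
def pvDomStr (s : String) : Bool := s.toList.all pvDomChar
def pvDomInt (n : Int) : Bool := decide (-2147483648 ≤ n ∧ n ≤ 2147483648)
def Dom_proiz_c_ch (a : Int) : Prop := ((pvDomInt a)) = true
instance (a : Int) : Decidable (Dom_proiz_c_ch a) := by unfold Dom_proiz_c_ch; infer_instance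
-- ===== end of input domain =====

-- B replaces A's arithmetic digit-peeling loop by one traversal of str(a); idiomatic, same cost.

-- ===== PORT A =====
-- the while-loop: state (a, b), peel a % 10 each turn
def proizLoopA (a b : Int) : Int :=
  if a > 0 then
    proizLoopA (PySem.Int.floordiv a 10)
      (if PySem.Int.mod (PySem.Int.mod a 10) 5 ≠ 0 then b * PySem.Int.mod a 10 else b)
  else b
  termination_by a.toNat
  decreasing_by
    have h : a > 0 := by assumption
    simp only [PySem.Int.floordiv]
    rw [Int.fdiv_eq_ediv]
    simp only [show ((0:Int) ≤ 10 ∨ (10:Int) ∣ a) from Or.inl (by norm_num), if_pos]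
    omega

def proiz_c_ch (a : Int) : Int := proizLoopA a 1

-- ===== PORT B =====
-- int(ch) for one character: exact on the decimal digit characters '0'..'9' produced by str(a) for a > 0
def pyDigitVal (c : Char) : Int := (c.toNat : Int) - 48

def proiz_c_ch_alt (a : Int) : Int :=
  if a > 0 then
    (PySem.Int.toStr a).toList.foldl
      (fun b c =>
        let d := pyDigitVal c
        if PySem.Int.mod d 5 ≠ 0 then b * d else b) 1
  else 1

-- ===== PRECONDITION & SPEC =====
def Spec_proiz_c_ch (a : Int) (out : Int) : Prop := out = proiz_c_ch_alt a
instance (a : Int) (out : Int) : Decidable (Spec_proiz_c_ch a out) := by unfold Spec_proiz_c_ch; infer_instance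

-- ===== CLAIM (what is proved, stated in full; the proofs are below) =====
def Claim_equal_proiz_c_ch : Prop := ∀ (a : Int), Dom_proiz_c_ch a → Spec_proiz_c_ch a (proiz_c_ch a)

-- ===== LEMMAS AND PROOFS =====

-- product of the digits of n (base 10) that are not divisible by 5
def pdig : Nat → Int
  | n =>
    if h : n = 0 then 1
    else (if (n % 10) % 5 ≠ 0 then ((n % 10 : Nat) : Int) else 1) * pdig (n / 10)
  termination_by n => n
  decreasing_by omega

-- the fold step of port B
def pstep (b : Int) (c : Char) : Int :=
  let d := pyDigitVal c
  if PySem.Int.mod d 5 ≠ 0 then b * d else b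

theorem pyDigitVal_digitChar (d : Nat) (h : d < 10) :
    pyDigitVal (Nat.digitChar d) = (d : Int) := by
  interval_cases d <;> decide

theorem pstep_digitChar (b : Int) (d : Nat) (h : d < 10) :
    pstep b (Nat.digitChar d) = b * (if d % 5 ≠ 0 then (d : Int) else 1) := by
  simp only [pstep, pyDigitVal_digitChar d h, PySem.Int.mod]
  by_cases h5 : d % 5 = 0
  · have : ((d : Int)).fmod 5 = 0 := by
      rw [Int.fmod_eq_emod]; simp; omega
    simp [h5, this]
  · have : ((d : Int)).fmod 5 ≠ 0 := by
      rw [Int.fmod_eq_emod]; simp; omega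
    simp [h5, this]

theorem foldl_toDigitsCore (fuel : Nat) :
    ∀ (n : Nat) (l : List Char) (b : Int), n < fuel →
      List.foldl pstep b (Nat.toDigitsCore 10 fuel n l) = List.foldl pstep (b * pdig n) l := by
  induction fuel with
  | zero => intro n l b h; omega
  | succ f ih =>
    intro n l b h
    by_cases h0 : n / 10 = 0
    · simp only [Nat.toDigitsCore, h0, reduceIte]
      rw [List.foldl_cons, pstep_digitChar b (n % 10) (by omega)]
      congr 1
      conv_rhs => rw [pdig]
      by_cases hn : n = 0
      · subst hn
        rw [dif_pos rfl]
        norm_num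
      · rw [dif_neg hn, h0, pdig, dif_pos rfl]
        simp
    · simp only [Nat.toDigitsCore, h0, reduceIte]
      rw [ih (n / 10) ((n % 10).digitChar :: l) b (by omega),
        List.foldl_cons, pstep_digitChar _ (n % 10) (by omega)]
      congr 1
      conv_rhs => rw [pdig]
      rw [dif_neg (by omega : n ≠ 0)]
      ring

theorem loopA_eq (k : Nat) : ∀ (a b : Int), a.toNat = k → 0 ≤ a →
    proizLoopA a b = b * pdig a.toNat := by
  induction k using Nat.strong_induction_on with
  | _ k ih =>
    intro a b hk ha
    rw [proizLoopA]
    by_cases hpos : a > 0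
    · rw [if_pos hpos]
      have hdiv : PySem.Int.floordiv a 10 = a / 10 := by
        simp only [PySem.Int.floordiv]
        rw [Int.fdiv_eq_ediv]
        simp only [show ((0:Int) ≤ 10 ∨ (10:Int) ∣ a) from Or.inl (by norm_num), if_pos]
        ring
      have hmod : PySem.Int.mod a 10 = a % 10 := by
        simp only [PySem.Int.mod]
        rw [Int.fmod_eq_emod]
        simp only [show ((0:Int) ≤ 10 ∨ (10:Int) ∣ a) from Or.inl (by norm_num), if_pos]
        ring
      have hmod5 : PySem.Int.mod (a % 10) 5 = (a % 10) % 5 := by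
        simp only [PySem.Int.mod]
        rw [Int.fmod_eq_emod]
        simp only [show ((0:Int) ≤ 5 ∨ (5:Int) ∣ a % 10) from Or.inl (by norm_num), if_pos]
        ring
      have hlt : (a / 10).toNat < k := by omega
      have h0 : (0:Int) ≤ a / 10 := by omega
      rw [hdiv, hmod, hmod5, ih _ hlt (a / 10) _ rfl h0]
      have hnz : a.toNat ≠ 0 := by omega
      conv_rhs => rw [pdig]
      rw [dif_neg hnz]
      have e1 : ((a.toNat % 10 : Nat) : Int) = a % 10 := by omega
      have e2 : a.toNat / 10 = (a / 10).toNat := by omega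
      rw [e2]
      by_cases h5 : (a % 10) % 5 = 0
      · have h5n : a.toNat % 10 % 5 = 0 := by omega
        rw [if_neg (by simp [h5]), if_neg (by simp [h5n])]
        ring
      · have h5n : a.toNat % 10 % 5 ≠ 0 := by omega
        rw [if_pos h5, if_pos h5n, e1]
        ring
    · rw [if_neg hpos]
      have h0 : a.toNat = 0 := by omega
      rw [h0, pdig, dif_pos rfl]
      ring

theorem alt_eq (a : Int) (ha : a > 0) : proiz_c_ch_alt a = pdig a.toNat := by
  have hneg : ¬ a < 0 := by omega
  rw [proiz_c_ch_alt, if_pos ha, PySem.Int.toList_toStr, PySem.Int.toChars, if_neg hneg]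
  show List.foldl pstep 1 (Nat.toDigits 10 a.toNat) = pdig a.toNat
  rw [Nat.toDigits, foldl_toDigitsCore (a.toNat + 1) a.toNat [] 1 (by omega)]
  simp

-- ===== VERDICT (by name: the statement is the Claim_ definition above) =====
theorem proiz_c_ch_spec : Claim_equal_proiz_c_ch := by
  intro a _
  unfold Spec_proiz_c_ch proiz_c_ch
  by_cases ha : a > 0
  · rw [alt_eq a ha, loopA_eq a.toNat a 1 rfl (by omega)]
    ring
  · rw [proizLoopA, if_neg ha, proiz_c_ch_alt, if_neg ha]
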